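-- pv_equiv track=rewrite | github.com/pwr-ai/juddges-app | backend/app/topic_modeling.py | _assign_time_periods
-- ===== SOURCE A (Python) =====
-- from typing import Any
--
-- def _assign_time_periods(
--     documents: list[dict[str, Any]], num_periods: int
-- ) -> tuple[list[tuple[str, str, str]], dict[int, int]]:
--     """
--     Assign documents to time periods based on date_issued.
--
--     Returns (period_definitions, doc_index_to_period_map).
--     Period definitions are (label, start_date, end_date) tuples.
--     """
--     # Extract valid dates
--     dated_docs: list[tuple[int, str]] = []
--     for idx, doc in enumerate(documents):
--         date_str = doc.get("date_issued")
--         if date_str: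
--             try:
--                 date_val = str(date_str)[:10]
--                 if len(date_val) >= 4:
--                     dated_docs.append((idx, date_val))
--             except (ValueError, TypeError):
--                 pass
--
--     if not dated_docs:
--         return [], {}
--
--     # Sort by date
--     dated_docs.sort(key=lambda x: x[1])
--     dates = [d[1] for d in dated_docs]
--
--     min_date = dates[0]
--     max_date = dates[-1]
--
--     # Create equal-sized time periods
--     min_year = int(min_date[:4])
--     max_year = int(max_date[:4])
--
--     if min_year == max_year:
--         # All in same year - split by months
--         periods = []
--         months_per_period = max(1, 12 // num_periods)
--         for i in range(num_periods):
--             start_month = i * months_per_period + 1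
--             end_month = min((i + 1) * months_per_period, 12)
--             label = f"{min_year}-M{start_month:02d}-M{end_month:02d}"
--             start = f"{min_year}-{start_month:02d}-01"
--             end = f"{min_year}-{end_month:02d}-28"
--             periods.append((label, start, end))
--     else:
--         # Split years into periods
--         total_years = max_year - min_year + 1
--         years_per_period = max(1, total_years // num_periods)
--
--         periods = []
--         current_year = min_year
--         for i in range(num_periods):
--             start_year = current_year
--             end_year = min(current_year + years_per_period - 1, max_year)
--             if i == num_periods - 1:
--                 end_year = max_year
--
--             if start_year == end_year:
--                 label = str(start_year)
--             else:
--                 label = f"{start_year}-{end_year}"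
--
--             periods.append((label, f"{start_year}-01-01", f"{end_year}-12-31"))
--             current_year = end_year + 1
--             if current_year > max_year:
--                 break
--
--     # Map documents to periods
--     doc_to_period: dict[int, int] = {}
--     for doc_idx, date_str in dated_docs:
--         for period_idx, (_, start, end) in enumerate(periods):
--             if start <= date_str <= end:
--                 doc_to_period[doc_idx] = period_idx
--                 break
--
--     return periods, doc_to_period
-- ===== SOURCE B (Python) =====
-- def _bisect_left(a, x):
--     lo, hi = 0, len(a)
--     while lo < hi:
--         mid = (lo + hi) // 2
--         if a[mid] < x:
--             lo = mid + 1
--         else: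
--             hi = mid
--     return lo
--
--
-- def _bisect_right(a, x):
--     lo, hi = 0, len(a)
--     while lo < hi:
--         mid = (lo + hi) // 2
--         if x < a[mid]:
--             hi = mid
--         else:
--             lo = mid + 1
--     return lo
--
--
-- def _assign_time_periods(documents, num_periods):
--     # Different algorithm: the period list is computed in closed form (no running-year
--     # loop with break), and documents are assigned to periods per PERIOD, not per
--     # document: since the dated list is sorted, the dates matching a period interval
--     # [start, end] form one contiguous slab, found with two binary searches; the
--     # first unassigned position wins, which reproduces first-match semantics.
--     dated = sorted(
--         (
--             (str(ds)[:10], i)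
--             for i, doc in enumerate(documents)
--             for ds in (doc.get("date_issued") or "",)
--             if len(str(ds)[:10]) >= 4
--         ),
--         key=lambda t: t[0],
--     )
--     if not dated:
--         return [], {}
--
--     dates = [d for d, _ in dated]
--     y0 = int(dates[0][:4])
--     y1 = int(dates[-1][:4])
--
--     if y0 == y1:
--         mpp = max(1, 12 // num_periods)
--         periods = [
--             (
--                 f"{y0}-M{i * mpp + 1:02d}-M{min((i + 1) * mpp, 12):02d}",
--                 f"{y0}-{i * mpp + 1:02d}-01",
--                 f"{y0}-{min((i + 1) * mpp, 12):02d}-28",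
--             )
--             for i in range(num_periods)
--         ]
--     else:
--         ypp = max(1, (y1 - y0 + 1) // num_periods)
--         k = min(num_periods, max(1, -((y0 - y1 - 1) // ypp)))  # ceil((y1-y0+1)/ypp), capped
--         periods = [
--             (
--                 (str(a) if a == b else f"{a}-{b}"),
--                 f"{a}-01-01",
--                 f"{b}-12-31",
--             )
--             for i in range(k)
--             for a in (y0 + i * ypp,)
--             for b in (y1 if i == k - 1 else a + ypp - 1,)
--         ]
--
--     n = len(dates)
--     assigned = [None] * n
--     for j, (_, s, e) in enumerate(periods):
--         lo = _bisect_left(dates, s)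
--         hi = _bisect_right(dates, e)
--         for t in range(lo, hi):
--             if assigned[t] is None:
--                 assigned[t] = j
--
--     mapping = {}
--     for t in range(n):
--         if assigned[t] is not None:
--             mapping[dated[t][1]] = assigned[t]
--     return periods, mapping
-- ===== Notes on version B (the rewrite author's own statement) =====
-- stated objective: alternative
-- what changed: B inverts the assignment loop: instead of scanning the period list once per document, it binary-searches (bisect) the sorted date list once per period to find the contiguous slab of dates inside that period and fills an assignment array (first period wins), and it computes the year-period list in closed form (period count via ceiling division) instead of A's running-year loop with break.
import Mathlib
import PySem

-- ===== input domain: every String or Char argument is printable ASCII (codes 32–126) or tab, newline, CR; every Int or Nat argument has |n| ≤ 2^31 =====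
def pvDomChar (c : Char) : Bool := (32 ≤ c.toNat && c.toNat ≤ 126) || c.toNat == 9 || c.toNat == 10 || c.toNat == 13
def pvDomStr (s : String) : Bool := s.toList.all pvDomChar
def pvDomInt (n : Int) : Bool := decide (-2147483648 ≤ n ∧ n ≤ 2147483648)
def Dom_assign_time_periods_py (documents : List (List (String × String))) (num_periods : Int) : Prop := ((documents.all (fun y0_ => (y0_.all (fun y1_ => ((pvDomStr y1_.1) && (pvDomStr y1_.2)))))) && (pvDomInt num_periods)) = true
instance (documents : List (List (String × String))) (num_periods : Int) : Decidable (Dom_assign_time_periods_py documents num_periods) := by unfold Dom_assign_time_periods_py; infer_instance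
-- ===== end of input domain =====

-- B assigns documents to periods per PERIOD (two binary searches delimit the contiguous
-- slab of sorted dates inside each period interval) instead of scanning the period list
-- per document, and computes the year-period list in closed form instead of A's
-- running-year loop with break; equivalence is proved on all inputs where Python A
-- returns (Pre_ below excludes exactly the inputs where A raises).

-- ===== PORT A =====

-- inner loop 'for period_idx, (_, start, end) in enumerate(periods): if start <= date <= end: ...; break'
def pvA_firstMatch (date : String) : List (String × String × String) → Int → Option Int
  | [], _ => none
  | p :: rest, j => if p.2.1 ≤ date ∧ date ≤ p.2.2 then some j else pvA_firstMatch date rest (j + 1)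

-- 'dated_docs' extraction loop of A
def pvA_extract (documents : List (List (String × String))) : List (Int × String) :=
  (PySem.List.enumerate documents).foldl (fun acc p =>
    match (PySem.Dict.mk p.2).get? "date_issued" with
    | none => acc
    | some ds =>
      if ds = "" then acc
      else
        let dv := PySem.Str.slice ds none (some 10)
        if 4 ≤ PySem.Str.len dv then acc ++ [(p.1, dv)] else acc) []

-- same-year branch: month periods, append loop over range(num_periods)
def pvA_monthPeriods (y np : Int) : List (String × String × String) :=
  let mpp := max 1 (PySem.Int.floordiv 12 np)
  (PySem.List.pyRange 0 np 1).foldl (fun acc i =>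
    let sm := i * mpp + 1
    let em := min ((i + 1) * mpp) 12
    acc ++ [(PySem.Int.toStr y ++ "-M" ++ PySem.Str.zfill (PySem.Int.toStr sm) 2 ++ "-M" ++
              PySem.Str.zfill (PySem.Int.toStr em) 2,
             PySem.Int.toStr y ++ "-" ++ PySem.Str.zfill (PySem.Int.toStr sm) 2 ++ "-01",
             PySem.Int.toStr y ++ "-" ++ PySem.Str.zfill (PySem.Int.toStr em) 2 ++ "-28")]) []

-- different-years branch: loop with current_year state and break (broken flag)
def pvA_yearPeriods (y0 y1 np : Int) : List (String × String × String) :=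
  let ypp := max 1 (PySem.Int.floordiv (y1 - y0 + 1) np)
  ((PySem.List.pyRange 0 np 1).foldl (fun st i =>
    if st.2.2 then st
    else
      let sy := st.2.1
      let ey0 := min (sy + ypp - 1) y1
      let ey := if i = np - 1 then y1 else ey0
      let label := if sy = ey then PySem.Int.toStr sy
                   else PySem.Int.toStr sy ++ "-" ++ PySem.Int.toStr ey
      (st.1 ++ [(label, PySem.Int.toStr sy ++ "-01-01", PySem.Int.toStr ey ++ "-12-31")],
        ey + 1, decide (y1 < ey + 1))) (([], y0, false) :
          List (String × String × String) × Int × Bool)).1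

def assign_time_periods_py (documents : List (List (String × String))) (num_periods : Int) :
    (List (String × String × String)) × (List (Int × Int)) :=
  let dated_docs := pvA_extract documents
  if dated_docs = [] then ([], [])
  else
    let dated := PySem.List.sorted dated_docs (fun x => x.2)
    let dates := dated.map (fun d => d.2)
    let min_date := PySem.List.pyGetD dates 0 ""
    let max_date := PySem.List.pyGetD dates (-1) ""
    let min_year := (PySem.Int.ofStr? (PySem.Str.slice min_date none (some 4))).getD 0
    let max_year := (PySem.Int.ofStr? (PySem.Str.slice max_date none (some 4))).getD 0
    let periods := if min_year = max_year then pvA_monthPeriods min_year num_periods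
                   else pvA_yearPeriods min_year max_year num_periods
    let doc_to_period := dated.foldl (fun d p =>
      match pvA_firstMatch p.2 periods 0 with
      | some j => d.insert p.1 j
      | none => d) (PySem.Dict.empty : PySem.Dict Int Int)
    (periods, doc_to_period.items)

-- ===== PORT B =====

-- the sorted comprehension of B (pairs (date, idx))
def pvB_pairs (documents : List (List (String × String))) : List (String × Int) :=
  (PySem.List.enumerate documents).filterMap (fun p =>
    let dv := PySem.Str.slice (((PySem.Dict.mk p.2).get? "date_issued").getD "") none (some 10)
    if 4 ≤ PySem.Str.len dv then some (dv, p.1) else none)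

def pvB_monthPeriods (y np : Int) : List (String × String × String) :=
  let mpp := max 1 (PySem.Int.floordiv 12 np)
  (PySem.List.pyRange 0 np 1).map (fun i =>
    (PySem.Int.toStr y ++ "-M" ++ PySem.Str.zfill (PySem.Int.toStr (i * mpp + 1)) 2 ++ "-M" ++
      PySem.Str.zfill (PySem.Int.toStr (min ((i + 1) * mpp) 12)) 2,
     PySem.Int.toStr y ++ "-" ++ PySem.Str.zfill (PySem.Int.toStr (i * mpp + 1)) 2 ++ "-01",
     PySem.Int.toStr y ++ "-" ++ PySem.Str.zfill (PySem.Int.toStr (min ((i + 1) * mpp) 12)) 2 ++ "-28"))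

-- closed-form list of year periods: k periods, period i covers a..b
def pvB_yearPeriods (y0 y1 np : Int) : List (String × String × String) :=
  let ypp := max 1 (PySem.Int.floordiv (y1 - y0 + 1) np)
  let k := min np (max 1 (-(PySem.Int.floordiv (y0 - y1 - 1) ypp)))
  (PySem.List.pyRange 0 k 1).map (fun i =>
    let a := y0 + i * ypp
    let b := if i = k - 1 then y1 else a + ypp - 1
    ((if a = b then PySem.Int.toStr a else PySem.Int.toStr a ++ "-" ++ PySem.Int.toStr b),
     PySem.Int.toStr a ++ "-01-01", PySem.Int.toStr b ++ "-12-31"))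

-- inner loop 'for t in range(lo, hi): if assigned[t] is None: assigned[t] = j'
def pvB_fillSlab (arr : List (Option Int)) (lo hi : Nat) (j : Int) : List (Option Int) :=
  (PySem.List.pyRange lo hi 1).foldl (fun a t =>
    if PySem.List.pyGetD a t none = none then PySem.List.pySetD a t (some j) else a) arr

-- 'for j, (_, s, e) in enumerate(periods): lo = _bisect_left(dates, s); hi = _bisect_right(dates, e); …'
-- (_bisect_left/_bisect_right in Source B are the standard bisect loops = PySem.List.bisectLeft/bisectRight)
def pvB_assigned (dates : List String) (periods : List (String × String × String)) : List (Option Int) :=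
  (PySem.List.enumerate periods).foldl (fun arr p =>
    pvB_fillSlab arr (PySem.List.bisectLeft dates p.2.2.1) (PySem.List.bisectRight dates p.2.2.2) p.1)
    (List.replicate dates.length none)

def assign_time_periods_py_alt (documents : List (List (String × String))) (num_periods : Int) :
    (List (String × String × String)) × (List (Int × Int)) :=
  let dated := PySem.List.sorted (pvB_pairs documents) (fun t => t.1)
  if dated = [] then ([], [])
  else
    let dates := dated.map (fun d => d.1)
    let y0 := (PySem.Int.ofStr? (PySem.Str.slice (PySem.List.pyGetD dates 0 "") none (some 4))).getD 0
    let y1 := (PySem.Int.ofStr? (PySem.Str.slice (PySem.List.pyGetD dates (-1) "") none (some 4))).getD 0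
    let periods := if y0 = y1 then pvB_monthPeriods y0 num_periods
                   else pvB_yearPeriods y0 y1 num_periods
    let assigned := pvB_assigned dates periods
    let mapping := (PySem.List.pyRange 0 (PySem.List.len dates) 1).foldl (fun m t =>
      match PySem.List.pyGetD assigned t none with
      | some j => m.insert (PySem.List.pyGetD dated t ("", 0)).2 j
      | none => m) (PySem.Dict.empty : PySem.Dict Int Int)
    (periods, mapping.items)

-- ===== PRECONDITION & SPEC =====

-- the date strings A keeps (first 10 chars, length ≥ 4); used only by Pre_
def pvKeptDates (documents : List (List (String × String))) : List (List Char) :=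
  documents.filterMap (fun doc =>
    let dv := PySem.List.slice (((PySem.Dict.mk doc).get? "date_issued").getD "").toList none (some 10)
    if 4 ≤ dv.length then some dv else none)

-- Pre_ excludes exactly the inputs where Python A raises: some document has a usable
-- date but num_periods = 0 (ZeroDivisionError) or int() on the first 4 characters of
-- the minimal/maximal kept date fails (ValueError).
def Pre_assign_time_periods_py (documents : List (List (String × String))) (num_periods : Int) : Prop :=
  pvKeptDates documents = [] ∨
    (num_periods ≠ 0 ∧
      (PySem.Int.ofChars? (PySem.List.slice ((PySem.List.min? (pvKeptDates documents) (fun s => s)).getD []) none (some 4))).isSome ∧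
      (PySem.Int.ofChars? (PySem.List.slice ((PySem.List.max? (pvKeptDates documents) (fun s => s)).getD []) none (some 4))).isSome)
instance (documents : List (List (String × String))) (num_periods : Int) : Decidable (Pre_assign_time_periods_py documents num_periods) := by unfold Pre_assign_time_periods_py; infer_instance

def pvWitness_assign_time_periods_py : (List (List (String × String))) × Int :=
  ([[("date_issued", "2000-01-05")], [("date_issued", "2001-03-04")]], 2)

def Spec_assign_time_periods_py (documents : List (List (String × String))) (num_periods : Int) (out : (List (String × String × String)) × (List (Int × Int))) : Prop := out = assign_time_periods_py_alt documents num_periods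
instance (documents : List (List (String × String))) (num_periods : Int) (out : (List (String × String × String)) × (List (Int × Int))) : Decidable (Spec_assign_time_periods_py documents num_periods out) := by unfold Spec_assign_time_periods_py; infer_instance

-- ===== CLAIM (what is proved, stated in full; the proofs are below) =====
def Claim_equal_assign_time_periods_py : Prop := ∀ (documents : List (List (String × String))) (num_periods : Int), Dom_assign_time_periods_py documents num_periods → Pre_assign_time_periods_py documents num_periods → Spec_assign_time_periods_py documents num_periods (assign_time_periods_py documents num_periods)

-- ===== LEMMAS AND PROOFS =====

theorem pv_front_aux (l : List (Int × List (String × String))) (acc : List (Int × String)) :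
    l.foldl (fun acc p =>
      match (PySem.Dict.mk p.2).get? "date_issued" with
      | none => acc
      | some ds =>
        if ds = "" then acc
        else
          let dv := PySem.Str.slice ds none (some 10)
          if 4 ≤ PySem.Str.len dv then acc ++ [(p.1, dv)] else acc) acc
    = acc ++ (l.filterMap (fun p =>
        let dv := PySem.Str.slice (((PySem.Dict.mk p.2).get? "date_issued").getD "") none (some 10)
        if 4 ≤ PySem.Str.len dv then some (dv, p.1) else none)).map (fun t => (t.2, t.1)) := by
  have h0 : ¬ (4 ≤ PySem.Str.len (PySem.Str.slice "" none (some 10))) := by decide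
  induction l generalizing acc with
  | nil => simp
  | cons p t ih =>
    rw [List.foldl_cons, List.filterMap_cons]
    cases hg : (PySem.Dict.mk p.2).get? "date_issued" with
    | none =>
      simp only [hg, Option.getD_none]
      rw [if_neg h0]
      exact ih acc
    | some ds =>
      by_cases he : ds = ""
      · subst he
        simp only [hg, Option.getD_some, if_pos rfl]
        rw [if_neg h0]
        exact ih acc
      · simp only [hg, Option.getD_some, if_neg he]
        by_cases hc : 4 ≤ PySem.Str.len (PySem.Str.slice ds none (some 10))
        · rw [if_pos hc, if_pos hc, ih (acc ++ [(p.1, PySem.Str.slice ds none (some 10))])]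
          simp
        · rw [if_neg hc, if_neg hc]
          exact ih acc

-- front: A's extraction is B's comprehension with the pair swapped
theorem pv_front (documents : List (List (String × String))) :
    pvA_extract documents = (pvB_pairs documents).map (fun t => (t.2, t.1)) := by
  unfold pvA_extract pvB_pairs
  rw [pv_front_aux]
  simp

theorem pv_insert_map (x : Int × String) (ys : List (Int × String)) :
    PySem.List.insertBy (fun a b => decide (a.1 < b.1)) (x.2, x.1)
        (ys.map (fun p => (p.2, p.1))) =
      (PySem.List.insertBy (fun a b => decide (a.2 < b.2)) x ys).map (fun p => (p.2, p.1)) := by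
  induction ys with
  | nil => simp only [List.map_nil, PySem.List.insertBy, List.map_cons]
  | cons y t ih =>
    simp only [List.map_cons, PySem.List.insertBy]
    by_cases h : x.2 < y.2
    · rw [if_pos (decide_eq_true h), if_pos (decide_eq_true h)]
      simp
    · rw [if_neg (by simpa using h), if_neg (by simpa using h)]
      simp only [List.map_cons, ih]

theorem pv_sort_aux (l : List (Int × String)) (acc : List (Int × String)) :
    (l.map (fun p => (p.2, p.1))).foldl
        (fun acc x => PySem.List.insertBy (fun a b => decide (a.1 < b.1)) x acc)
        (acc.map (fun p => (p.2, p.1))) =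
      (l.foldl (fun acc x => PySem.List.insertBy (fun a b => decide (a.2 < b.2)) x acc) acc).map
        (fun p => (p.2, p.1)) := by
  induction l generalizing acc with
  | nil => simp
  | cons x t ih =>
    simp only [List.map_cons, List.foldl_cons]
    rw [pv_insert_map, ih]

-- sorting the swapped pairs by their first component is the swap of A's sort
theorem pv_sort (l : List (Int × String)) :
    PySem.List.sorted (l.map (fun p => (p.2, p.1))) (fun t => t.1) =
      (PySem.List.sorted l (fun x => x.2)).map (fun p => (p.2, p.1)) := by
  rw [PySem.List.sorted_eq_foldl_insertBy, PySem.List.sorted_eq_foldl_insertBy]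
  simpa using pv_sort_aux l []

-- the month-period loop is a map
theorem pv_month (y np : Int) : pvA_monthPeriods y np = pvB_monthPeriods y np := by
  unfold pvA_monthPeriods pvB_monthPeriods
  simp only [PySem.List.foldl_append_singleton_eq_map, List.nil_append]

-- the year-period loop with break equals the closed form
theorem pv_year (y0 y1 np : Int) : pvA_yearPeriods y0 y1 np = pvB_yearPeriods y0 y1 np := by
  unfold pvA_yearPeriods pvB_yearPeriods
  simp only []
  by_cases hnp : np ≤ 0
  · rw [PySem.List.pyRange_one_eq_nil hnp, PySem.List.pyRange_one_eq_nil
      (le_trans (min_le_left _ _) hnp)]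
    rfl
  push_neg at hnp
  generalize hypp : max 1 (PySem.Int.floordiv (y1 - y0 + 1) np) = ypp
  have h1 : 1 ≤ ypp := by rw [← hypp]; exact le_max_left _ _
  generalize hc : max 1 (-(PySem.Int.floordiv (y0 - y1 - 1) ypp)) = c
  have hc1 : 1 ≤ c := by rw [← hc]; exact le_max_left _ _
  generalize hk : min np c = k
  have hk1 : 1 ≤ k := by rw [← hk]; exact le_min hnp hc1
  have hknp : k ≤ np := by rw [← hk]; exact min_le_left _ _
  have hkc : k ≤ c := by rw [← hk]; exact min_le_right _ _
  have hceil : (-(PySem.Int.floordiv (y0 - y1 - 1) ypp) - 1) * ypp < y1 - y0 + 1 ∧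
      y1 - y0 + 1 ≤ -(PySem.Int.floordiv (y0 - y1 - 1) ypp) * ypp := by
    have harg : y0 - y1 - 1 = -(y1 - y0 + 1) := by ring
    rw [harg]
    exact (PySem.Int.neg_floordiv_neg_eq_iff_of_pos (by omega)).mp rfl
  have hc0 : c = 1 ∨ c = -(PySem.Int.floordiv (y0 - y1 - 1) ypp) := by
    have h := max_choice 1 (-(PySem.Int.floordiv (y0 - y1 - 1) ypp))
    rw [hc] at h
    exact h
  have hcge : -(PySem.Int.floordiv (y0 - y1 - 1) ypp) ≤ c := by
    have h := le_max_right 1 (-(PySem.Int.floordiv (y0 - y1 - 1) ypp))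
    rw [hc] at h
    exact h
  have K1 : y1 - y0 + 1 ≤ c * ypp := by
    rcases hc0 with h | h
    · have hle : -(PySem.Int.floordiv (y0 - y1 - 1) ypp) ≤ 1 := by omega
      have hmul : -(PySem.Int.floordiv (y0 - y1 - 1) ypp) * ypp ≤ 1 * ypp :=
        mul_le_mul_of_nonneg_right hle (by omega)
      have h2 := hceil.2
      rw [h]
      omega
    · rw [h]
      exact hceil.2
  have K2 : ∀ i : Int, 0 ≤ i → i + 1 < c → y0 + (i + 1) * ypp - 1 < y1 := by
    intro i hi0 hi
    have hc2 : 2 ≤ c := by omega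
    rcases hc0 with h | h
    · omega
    · have step : (i + 1) * ypp ≤ (c - 1) * ypp :=
        mul_le_mul_of_nonneg_right (by omega) (by omega)
      have h' := hceil.1
      rw [← h] at h'
      omega
  have inv : ∀ n : Int, 0 ≤ n → n ≤ np →
      ((PySem.List.pyRange 0 n 1).foldl (fun st i =>
        if st.2.2 then st
        else
          let sy := st.2.1
          let ey0 := min (sy + ypp - 1) y1
          let ey := if i = np - 1 then y1 else ey0
          let label := if sy = ey then PySem.Int.toStr sy
                       else PySem.Int.toStr sy ++ "-" ++ PySem.Int.toStr ey
          (st.1 ++ [(label, PySem.Int.toStr sy ++ "-01-01", PySem.Int.toStr ey ++ "-12-31")],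
            ey + 1, decide (y1 < ey + 1))) (([], y0, false) :
              List (String × String × String) × Int × Bool)) =
      (if n < k then
        (((PySem.List.pyRange 0 n 1).map (fun i =>
          let a := y0 + i * ypp
          let b := if i = k - 1 then y1 else a + ypp - 1
          ((if a = b then PySem.Int.toStr a else PySem.Int.toStr a ++ "-" ++ PySem.Int.toStr b),
           PySem.Int.toStr a ++ "-01-01", PySem.Int.toStr b ++ "-12-31"))), y0 + n * ypp, false)
      else
        (((PySem.List.pyRange 0 k 1).map (fun i =>
          let a := y0 + i * ypp
          let b := if i = k - 1 then y1 else a + ypp - 1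
          ((if a = b then PySem.Int.toStr a else PySem.Int.toStr a ++ "-" ++ PySem.Int.toStr b),
           PySem.Int.toStr a ++ "-01-01", PySem.Int.toStr b ++ "-12-31"))), y1 + 1, true)) := by
    intro n hn
    induction n, hn using Int.le_induction with
    | base =>
      intro _
      rw [if_pos (by omega), PySem.List.pyRange_one_eq_nil le_rfl]
      simp
    | succ n hn ih =>
      intro hle
      rw [PySem.List.pyRange_one_succ_right hn, List.foldl_append, ih (by omega), List.foldl_cons,
        List.foldl_nil]
      by_cases hlt : n < k
      · rw [if_pos hlt]
        simp only [Bool.false_eq_true, if_false]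
        by_cases hn1 : n + 1 < k
        · have hnnp : n ≠ np - 1 := by omega
          have hklt : n ≠ k - 1 := by omega
          have hlt2 : y0 + (n + 1) * ypp - 1 < y1 := K2 n hn (by omega)
          have hnn : n * ypp + ypp = (n + 1) * ypp := by ring
          have hmin : min (y0 + n * ypp + ypp - 1) y1 = y0 + n * ypp + ypp - 1 := by
            rw [min_eq_left]
            omega
          have hflag : decide (y1 < y0 + n * ypp + ypp - 1 + 1) = false :=
            decide_eq_false (by omega)
          rw [if_pos hn1, if_neg hnnp, hmin, hflag, List.map_append, List.map_cons, List.map_nil]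
          rw [if_neg hklt,
            show y0 + n * ypp + ypp - 1 + 1 = y0 + (n + 1) * ypp from by ring]
        · -- n = k - 1 : the last period emitted; it ends at y1 and the loop breaks
          have hkn : k = n + 1 := by omega
          have hnn : n * ypp + ypp = (n + 1) * ypp := by ring
          have hey : (if n = np - 1 then y1 else min (y0 + n * ypp + ypp - 1) y1) = y1 := by
            by_cases hnp1 : n = np - 1
            · rw [if_pos hnp1]
            · rw [if_neg hnp1, min_eq_right]
              have hkcnp : k = c := by omega
              have hT : y1 - y0 + 1 ≤ k * ypp := by rw [hkcnp]; exact K1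
              rw [hkn] at hT
              omega
          have hflag : decide (y1 < y1 + 1) = true := decide_eq_true (by omega)
          rw [if_neg hn1, hey, hflag, hkn, PySem.List.pyRange_one_succ_right hn,
            List.map_append, List.map_cons, List.map_nil]
          rw [if_pos (by omega : n = n + 1 - 1)]
      · rw [if_neg hlt, if_neg (by omega : ¬ n + 1 < k)]
        simp only [if_true]
  have hfin := inv np (by omega) le_rfl
  rw [if_neg (by omega : ¬ np < k)] at hfin
  exact congrArg Prod.fst hfin

-- ---- binary-search specs on a sorted list of strings ----

theorem pv_blLoop_spec (xs : List String) (x : String)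
    (h : List.Pairwise (· ≤ ·) xs) :
    ∀ (fuel lo hi : Nat), lo ≤ hi → hi ≤ xs.length → hi - lo ≤ fuel →
      (∀ j (hj : j < xs.length), j < lo → xs[j] < x) →
      (∀ j (hj : j < xs.length), hi ≤ j → x ≤ xs[j]) →
      lo ≤ PySem.List.bisectLeftLoop xs x fuel lo hi ∧
      PySem.List.bisectLeftLoop xs x fuel lo hi ≤ hi ∧
      (∀ j (hj : j < xs.length), j < PySem.List.bisectLeftLoop xs x fuel lo hi → xs[j] < x) ∧
      (∀ j (hj : j < xs.length), PySem.List.bisectLeftLoop xs x fuel lo hi ≤ j → x ≤ xs[j]) := by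
  have hmono : ∀ (p q : Nat) (hp : p < xs.length) (hq : q < xs.length), p ≤ q → xs[p] ≤ xs[q] := by
    intro p q hp hq hpq
    rcases Nat.lt_or_ge p q with h' | h'
    · exact (List.pairwise_iff_getElem.mp h) p q hp hq h'
    · have : p = q := by omega
      subst this; exact le_refl _
  intro fuel
  induction fuel with
  | zero =>
    intro lo hi h1 h2 h3 hlo hhi
    have : lo = hi := by omega
    subst this
    simp only [PySem.List.bisectLeftLoop]
    exact ⟨le_refl _, le_refl _, hlo, hhi⟩
  | succ fuel ih =>
    intro lo hi h1 h2 h3 hlo hhi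
    rw [PySem.List.bisectLeftLoop]
    by_cases hlt : lo < hi
    · rw [if_pos hlt]
      have hmid1 : lo ≤ (lo + hi) / 2 := by omega
      have hmid2 : (lo + hi) / 2 < hi := by omega
      have hmlen : (lo + hi) / 2 < xs.length := by omega
      rw [List.getElem?_eq_getElem hmlen]
      by_cases hxm : xs[(lo + hi) / 2] < x
      · simp only [if_pos hxm]
        have hres := ih ((lo + hi) / 2 + 1) hi (by omega) h2 (by omega)
          (by intro j hj hjlt
              exact lt_of_le_of_lt (hmono j ((lo+hi)/2) hj hmlen (by omega)) hxm) hhi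
        exact ⟨by omega, hres.2.1, hres.2.2.1, hres.2.2.2⟩
      · simp only [if_neg hxm]
        have hxle : x ≤ xs[(lo + hi) / 2] := le_of_not_gt hxm
        have hres := ih lo ((lo + hi) / 2) (by omega) (by omega) (by omega) hlo
          (by intro j hj hjge
              exact le_trans hxle (hmono ((lo+hi)/2) j hmlen hj hjge))
        exact ⟨hres.1, by omega, hres.2.2.1, hres.2.2.2⟩
    · rw [if_neg hlt]
      exact ⟨le_refl _, h1, hlo, fun j hj hle => hhi j hj (by omega)⟩

theorem pv_brLoop_spec (xs : List String) (x : String)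
    (h : List.Pairwise (· ≤ ·) xs) :
    ∀ (fuel lo hi : Nat), lo ≤ hi → hi ≤ xs.length → hi - lo ≤ fuel →
      (∀ j (hj : j < xs.length), j < lo → xs[j] ≤ x) →
      (∀ j (hj : j < xs.length), hi ≤ j → x < xs[j]) →
      lo ≤ PySem.List.bisectRightLoop xs x fuel lo hi ∧
      PySem.List.bisectRightLoop xs x fuel lo hi ≤ hi ∧
      (∀ j (hj : j < xs.length), j < PySem.List.bisectRightLoop xs x fuel lo hi → xs[j] ≤ x) ∧
      (∀ j (hj : j < xs.length), PySem.List.bisectRightLoop xs x fuel lo hi ≤ j → x < xs[j]) := by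
  have hmono : ∀ (p q : Nat) (hp : p < xs.length) (hq : q < xs.length), p ≤ q → xs[p] ≤ xs[q] := by
    intro p q hp hq hpq
    rcases Nat.lt_or_ge p q with h' | h'
    · exact (List.pairwise_iff_getElem.mp h) p q hp hq h'
    · have : p = q := by omega
      subst this; exact le_refl _
  intro fuel
  induction fuel with
  | zero =>
    intro lo hi h1 h2 h3 hlo hhi
    have : lo = hi := by omega
    subst this
    simp only [PySem.List.bisectRightLoop]
    exact ⟨le_refl _, le_refl _, hlo, hhi⟩
  | succ fuel ih =>
    intro lo hi h1 h2 h3 hlo hhi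
    rw [PySem.List.bisectRightLoop]
    by_cases hlt : lo < hi
    · rw [if_pos hlt]
      have hmid1 : lo ≤ (lo + hi) / 2 := by omega
      have hmid2 : (lo + hi) / 2 < hi := by omega
      have hmlen : (lo + hi) / 2 < xs.length := by omega
      rw [List.getElem?_eq_getElem hmlen]
      by_cases hxm : x < xs[(lo + hi) / 2]
      · simp only [if_pos hxm]
        have hres := ih lo ((lo + hi) / 2) (by omega) (by omega) (by omega) hlo
          (by intro j hj hjge
              exact lt_of_lt_of_le hxm (hmono ((lo+hi)/2) j hmlen hj hjge))
        exact ⟨hres.1, by omega, hres.2.2.1, hres.2.2.2⟩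
      · simp only [if_neg hxm]
        have hxle : xs[(lo + hi) / 2] ≤ x := le_of_not_gt hxm
        have hres := ih ((lo + hi) / 2 + 1) hi (by omega) h2 (by omega)
          (by intro j hj hjlt
              exact le_trans (hmono j ((lo+hi)/2) hj hmlen (by omega)) hxle) hhi
        exact ⟨by omega, hres.2.1, hres.2.2.1, hres.2.2.2⟩
    · rw [if_neg hlt]
      exact ⟨le_refl _, h1, hlo, fun j hj hle => hhi j hj (by omega)⟩

-- bisect_left: positions at or beyond the result are the dates ≥ x
theorem pv_bisectLeft_iff (xs : List String) (x : String) (h : List.Pairwise (· ≤ ·) xs)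
    (t : Nat) (ht : t < xs.length) :
    PySem.List.bisectLeft xs x ≤ t ↔ x ≤ xs[t] := by
  have hres := pv_blLoop_spec xs x h xs.length 0 xs.length (by omega) le_rfl (by omega)
    (by intro j hj hjlt; omega) (by intro j hj hge; omega)
  unfold PySem.List.bisectLeft
  constructor
  · intro hle
    exact hres.2.2.2 t ht hle
  · intro hxle
    by_contra hc
    exact absurd hxle (not_le_of_gt (hres.2.2.1 t ht (by omega)))

-- bisect_right: positions before the result are the dates ≤ x
theorem pv_bisectRight_iff (xs : List String) (x : String) (h : List.Pairwise (· ≤ ·) xs)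
    (t : Nat) (ht : t < xs.length) :
    t < PySem.List.bisectRight xs x ↔ xs[t] ≤ x := by
  have hres := pv_brLoop_spec xs x h xs.length 0 xs.length (by omega) le_rfl (by omega)
    (by intro j hj hjlt; omega) (by intro j hj hge; omega)
  unfold PySem.List.bisectRight
  constructor
  · intro hle
    exact hres.2.2.1 t ht hle
  · intro hxle
    by_contra hc
    exact absurd hxle (not_le_of_gt (hres.2.2.2 t ht (by omega)))

-- ---- the slab-filling loop ----

theorem pv_fillSlab_length (arr : List (Option Int)) (lo hi : Nat) (j : Int) :
    (pvB_fillSlab arr lo hi j).length = arr.length := by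
  unfold pvB_fillSlab
  generalize PySem.List.pyRange (lo : Int) (hi : Int) 1 = L
  induction L generalizing arr with
  | nil => rfl
  | cons t ts ih =>
    rw [List.foldl_cons]
    split_ifs with hcond
    · rw [ih, PySem.List.length_pySetD]
    · exact ih arr

theorem pv_fillSlab_getD (arr : List (Option Int)) (lo hi : Nat) (j : Int)
    (t : Nat) (ht : t < arr.length) :
    (pvB_fillSlab arr lo hi j).getD t none =
      if lo ≤ t ∧ t < hi ∧ arr.getD t none = none then some j else arr.getD t none := by
  induction hi generalizing arr with
  | zero =>
    unfold pvB_fillSlab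
    rw [PySem.List.pyRange_one_eq_nil (by exact_mod_cast Nat.zero_le lo)]
    simp
  | succ hi ih =>
    by_cases hle : lo ≤ hi
    · have hstep : pvB_fillSlab arr lo (hi + 1) j =
          (fun a => if PySem.List.pyGetD a (hi : Int) none = none
                    then PySem.List.pySetD a (hi : Int) (some j) else a)
            (pvB_fillSlab arr lo hi j) := by
        unfold pvB_fillSlab
        rw [show ((hi + 1 : Nat) : Int) = (hi : Int) + 1 from by push_cast; ring,
          PySem.List.pyRange_one_succ_right (by exact_mod_cast hle), List.foldl_append,
          List.foldl_cons, List.foldl_nil]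
      have hlen : (pvB_fillSlab arr lo hi j).length = arr.length := pv_fillSlab_length arr lo hi j
      rw [hstep]
      simp only [PySem.List.pyGetD_natCast, PySem.List.pySetD_natCast]
      have hgd : ∀ (l : List (Option Int)) (i : Nat), l.getD i none = (l[i]?).getD none := by
        intro l i; rw [List.getD_eq_getElem?_getD]
      by_cases hnone : (pvB_fillSlab arr lo hi j).getD hi none = none
      · rw [if_pos hnone]
        by_cases hth : t = hi
        · have hcur : arr.getD t none = none := by
            have h2 := ih arr ht
            rw [if_neg (by omega : ¬ (lo ≤ t ∧ t < hi ∧ arr.getD t none = none))] at h2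
            rw [← h2, hth]; exact hnone
          rw [hgd, List.getElem?_set, if_pos hth.symm,
            if_pos (by omega : hi < (pvB_fillSlab arr lo hi j).length)]
          rw [if_pos ⟨by omega, by omega, hcur⟩]
          rfl
        · rw [hgd, List.getElem?_set, if_neg (fun hh => hth hh.symm), ← hgd, ih arr ht]
          by_cases hcond : lo ≤ t ∧ t < hi ∧ arr.getD t none = none
          · rw [if_pos hcond, if_pos ⟨hcond.1, by omega, hcond.2.2⟩]
          · rw [if_neg hcond, if_neg (by
              intro hh
              exact hcond ⟨hh.1, by omega, hh.2.2⟩)]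
      · rw [if_neg hnone, ih arr ht]
        by_cases hth : t = hi
        · have hcur : arr.getD t none ≠ none := by
            have h2 := ih arr ht
            rw [if_neg (by omega : ¬ (lo ≤ t ∧ t < hi ∧ arr.getD t none = none))] at h2
            rw [← h2, hth]; exact hnone
          rw [if_neg (by omega : ¬ (lo ≤ t ∧ t < hi ∧ arr.getD t none = none)),
            if_neg (fun hh => hcur hh.2.2)]
        · by_cases hcond : lo ≤ t ∧ t < hi ∧ arr.getD t none = none
          · rw [if_pos hcond, if_pos ⟨hcond.1, by omega, hcond.2.2⟩]
          · rw [if_neg hcond, if_neg (by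
              intro hh
              exact hcond ⟨hh.1, by omega, hh.2.2⟩)]
    · have hnil : pvB_fillSlab arr lo (hi + 1) j = arr := by
        unfold pvB_fillSlab
        rw [PySem.List.pyRange_one_eq_nil (by exact_mod_cast Nat.succ_le_of_lt (by omega))]
        rfl
      rw [hnil, if_neg (by omega : ¬ (lo ≤ t ∧ t < hi + 1 ∧ arr.getD t none = none))]

-- ---- the per-period assignment equals first-match per document ----

theorem pv_assigned_go (dates : List String) (hds : List.Pairwise (· ≤ ·) dates)
    (qs : List (String × String × String)) :
    ∀ (j0 : Int) (arr : List (Option Int)), arr.length = dates.length →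
      (((PySem.List.enumerate qs j0).foldl (fun arr p =>
          pvB_fillSlab arr (PySem.List.bisectLeft dates p.2.2.1)
            (PySem.List.bisectRight dates p.2.2.2) p.1) arr).length = dates.length ∧
       ∀ t (ht : t < dates.length),
         ((PySem.List.enumerate qs j0).foldl (fun arr p =>
            pvB_fillSlab arr (PySem.List.bisectLeft dates p.2.2.1)
              (PySem.List.bisectRight dates p.2.2.2) p.1) arr).getD t none =
           match arr.getD t none with
           | some v => some v
           | none => pvA_firstMatch dates[t] qs j0) := by
  induction qs with
  | nil =>
    intro j0 arr hlen
    rw [show PySem.List.enumerate ([] : List (String × String × String)) j0 = [] from rfl]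
    refine ⟨hlen, ?_⟩
    intro t ht
    rw [List.foldl_nil]
    cases arr.getD t none <;> rfl
  | cons q qs ih =>
    intro j0 arr hlen
    rw [PySem.List.enumerate_cons, List.foldl_cons]
    have hlen' : (pvB_fillSlab arr (PySem.List.bisectLeft dates q.2.1)
        (PySem.List.bisectRight dates q.2.2) j0).length = dates.length := by
      rw [pv_fillSlab_length]; exact hlen
    obtain ⟨hl2, hres⟩ := ih (j0 + 1) _ hlen'
    refine ⟨hl2, ?_⟩
    intro t ht
    rw [hres t ht]
    have htarr : t < arr.length := by omega
    rw [pv_fillSlab_getD arr _ _ j0 t htarr]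
    have hslab : (PySem.List.bisectLeft dates q.2.1 ≤ t ∧ t < PySem.List.bisectRight dates q.2.2)
        ↔ (q.2.1 ≤ dates[t] ∧ dates[t] ≤ q.2.2) := by
      constructor
      · intro hh
        exact ⟨(pv_bisectLeft_iff dates q.2.1 hds t ht).mp hh.1,
               (pv_bisectRight_iff dates q.2.2 hds t ht).mp hh.2⟩
      · intro hh
        exact ⟨(pv_bisectLeft_iff dates q.2.1 hds t ht).mpr hh.1,
               (pv_bisectRight_iff dates q.2.2 hds t ht).mpr hh.2⟩
    cases harr : arr.getD t none with
    | some v =>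
      rw [if_neg (fun hh => Option.some_ne_none v hh.2.2)]
    | none =>
      rw [pvA_firstMatch]
      by_cases hin : q.2.1 ≤ dates[t] ∧ dates[t] ≤ q.2.2
      · rw [if_pos ⟨(hslab.mpr hin).1, (hslab.mpr hin).2, rfl⟩, if_pos hin]
      · rw [if_neg (fun hh => hin (hslab.mp ⟨hh.1, hh.2.1⟩)), if_neg hin]

theorem pv_assigned_getD (dates : List String) (hds : List.Pairwise (· ≤ ·) dates)
    (periods : List (String × String × String)) (t : Nat) (ht : t < dates.length) :
    (pvB_assigned dates periods).getD t none = pvA_firstMatch dates[t] periods 0 := by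
  unfold pvB_assigned
  obtain ⟨_, hres⟩ := pv_assigned_go dates hds periods 0 (List.replicate dates.length none)
    (List.length_replicate)
  rw [hres t ht, List.getD_replicate _ ht]

-- ---- the final mapping loop of B equals A's per-document dict loop ----

theorem pv_mapping (S : List (Int × String)) (periods : List (String × String × String))
    (hsort : List.Pairwise (fun a b => a.2 ≤ b.2) S) :
    (PySem.List.pyRange 0 (PySem.List.len (S.map (fun d => d.2))) 1).foldl (fun m t =>
        match PySem.List.pyGetD (pvB_assigned (S.map (fun d => d.2)) periods) t none with
        | some j => m.insert (PySem.List.pyGetD (S.map (fun p => (p.2, p.1))) t ("", 0)).2 j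
        | none => m) (PySem.Dict.empty : PySem.Dict Int Int) =
      S.foldl (fun d p =>
        match pvA_firstMatch p.2 periods 0 with
        | some j => d.insert p.1 j
        | none => d) (PySem.Dict.empty : PySem.Dict Int Int) := by
  have hds : List.Pairwise (· ≤ ·) (S.map (fun d => d.2)) := by
    rw [List.pairwise_map]
    exact hsort
  have hlenA : (pvB_assigned (S.map (fun d => d.2)) periods).length = S.length := by
    unfold pvB_assigned
    obtain ⟨hl, _⟩ := pv_assigned_go (S.map (fun d => d.2)) hds periods 0
      (List.replicate (S.map (fun d => d.2)).length none) (List.length_replicate)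
    rw [hl, List.length_map]
  have hSrep : S.foldl (fun d p =>
      match pvA_firstMatch p.2 periods 0 with
      | some j => d.insert p.1 j
      | none => d) (PySem.Dict.empty : PySem.Dict Int Int) =
    (PySem.List.pyRange 0 (PySem.List.len S) 1).foldl (fun d t =>
      match pvA_firstMatch (PySem.List.pyGetD S t ((0 : Int), "")).2 periods 0 with
      | some j => d.insert (PySem.List.pyGetD S t ((0 : Int), "")).1 j
      | none => d) (PySem.Dict.empty : PySem.Dict Int Int) := by
    conv_lhs =>
      rw [← PySem.List.map_snd_enumerate S 0,
        PySem.List.enumerate_eq_map_pyRange S ((0 : Int), ""), List.map_map, List.foldl_map]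
    rfl
  rw [hSrep]
  have hlen2 : PySem.List.len (S.map (fun d => d.2)) = PySem.List.len S := by
    simp [PySem.List.len_eq]
  rw [hlen2]
  apply PySem.List.foldl_congr_mem
  intro acc x hx
  rw [PySem.List.mem_pyRange_one] at hx
  obtain ⟨hx0, hxlt⟩ := hx
  have hxlen : x.toNat < S.length := by
    rw [PySem.List.len_eq] at hxlt
    omega
  have hxeq : x = ((x.toNat : Nat) : Int) := by omega
  rw [hxeq, PySem.List.pyGetD_natCast, PySem.List.pyGetD_natCast, PySem.List.pyGetD_natCast]
  have h1 : (S.map (fun p => (p.2, p.1))).getD x.toNat ("", 0) =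
      ((S.getD x.toNat ((0 : Int), "")).2, (S.getD x.toNat ((0 : Int), "")).1) := by
    rw [List.getD_eq_getElem?_getD, List.getD_eq_getElem?_getD, List.getElem?_map,
      List.getElem?_eq_getElem hxlen]
    rfl
  have h2 : (pvB_assigned (S.map (fun d => d.2)) periods).getD x.toNat none =
      pvA_firstMatch (S.getD x.toNat ((0 : Int), "")).2 periods 0 := by
    rw [pv_assigned_getD (S.map (fun d => d.2)) hds periods x.toNat
      (by rw [List.length_map]; exact hxlen)]
    rw [List.getElem_map, List.getD_eq_getElem?_getD, List.getElem?_eq_getElem hxlen]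
    rfl
  rw [h1, h2]

-- maps collapse: first components of the swapped pairs are A's dates
theorem pv_maps (S : List (Int × String)) :
    (S.map (fun p => (p.2, p.1))).map (fun d => d.1) = S.map (fun d => d.2) := by
  rw [List.map_map]
  rfl

-- ===== VERDICT (by name: the statement is the Claim_ definition above) =====
theorem assign_time_periods_py_spec : Claim_equal_assign_time_periods_py := by
  intro documents num_periods _ _
  unfold Spec_assign_time_periods_py
  have hP : pvB_pairs documents = (pvA_extract documents).map (fun p => (p.2, p.1)) := by
    rw [pv_front, List.map_map,
      show ((fun p : Int × String => (p.2, p.1)) ∘ (fun t : String × Int => (t.2, t.1))) = id from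
        rfl,
      List.map_id]
  have hsort : List.Pairwise (fun a b : Int × String => a.2 ≤ b.2)
      (PySem.List.sorted (pvA_extract documents) (fun x => x.2)) :=
    PySem.List.sorted_pairwise (pvA_extract documents) (fun x => x.2)
  simp only [assign_time_periods_py, assign_time_periods_py_alt, hP, pv_sort, pv_maps,
    pv_month, pv_year, pv_mapping _ _ hsort, PySem.List.sorted_eq_nil_iff, List.map_eq_nil_iff]
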